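-- pv_equiv track=rewrite | github.com/info-sec-bot/pcep-labs | txtAnalyzer.py | basic_count
-- ===== SOURCE A (Python) =====
-- def basic_count(text:str)->dict:
--     counts = {"chars": 0, "letters": 0, "digits": 0, "spaces": 0}
--     for char in text:
--         counts["chars"] += 1
--         if char.isalpha():
--             counts["letters"] += 1
--         if char.isdigit():
--             counts["digits"] += 1
--         if char.isspace():
--             counts["spaces"] += 1
--     return counts
-- ===== SOURCE B (Python) =====
-- def _bc_rec(s):
--     # divide-and-conquer reduction: counts are a commutative-monoid sum over chars
--     if len(s) <= 1:
--         if not s: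
--             return (0, 0, 0, 0)
--         return (1, int(s.isalpha()), int(s.isdigit()), int(s.isspace()))
--     mid = len(s) // 2
--     a = _bc_rec(s[:mid])
--     b = _bc_rec(s[mid:])
--     return (a[0] + b[0], a[1] + b[1], a[2] + b[2], a[3] + b[3])
--
-- def basic_count(text: str) -> dict:
--     ch, le, di, sp = _bc_rec(text)
--     return {"chars": ch, "letters": le, "digits": di, "spaces": sp}
-- ===== Notes on version B (the rewrite author's own statement) =====
-- stated objective: alternative
-- what changed: A's single fused left-to-right loop mutating a counter dict is replaced by a divide-and-conquer reduction: the string is split in half recursively, leaves yield a 4-tuple of 0/1 counts, and halves are combined by component-wise addition.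
import Mathlib
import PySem

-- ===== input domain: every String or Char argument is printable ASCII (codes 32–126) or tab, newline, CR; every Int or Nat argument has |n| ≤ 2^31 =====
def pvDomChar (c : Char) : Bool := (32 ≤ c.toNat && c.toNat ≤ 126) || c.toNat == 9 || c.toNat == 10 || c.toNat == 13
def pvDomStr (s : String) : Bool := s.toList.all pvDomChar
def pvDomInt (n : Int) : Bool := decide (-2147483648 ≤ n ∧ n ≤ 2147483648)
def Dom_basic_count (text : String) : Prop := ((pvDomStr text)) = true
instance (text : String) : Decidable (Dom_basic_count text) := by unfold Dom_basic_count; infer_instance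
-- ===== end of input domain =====

-- B replaces A's fused counting loop by a divide-and-conquer reduction (split in half, add component-wise); objective: alternative, same O(n) cost.

-- ===== PORT A =====
-- the body of A's for-loop: counts["chars"] += 1; three ifs
def basic_count_step (d : PySem.Dict String Int) (char : Char) : PySem.Dict String Int :=
  let d := d.modify "chars" 0 (· + 1)
  let d := if PySem.Chars.isalpha char then d.modify "letters" 0 (· + 1) else d
  let d := if PySem.Chars.isdigit char then d.modify "digits" 0 (· + 1) else d
  if PySem.Chars.isspace char then d.modify "spaces" 0 (· + 1) else d

def basic_count (text : String) : List (String × Int) :=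
  let counts : PySem.Dict String Int :=
    PySem.Dict.ofList [("chars", 0), ("letters", 0), ("digits", 0), ("spaces", 0)]
  let counts := text.toList.foldl basic_count_step counts
  counts.items

-- ===== PORT B =====
-- _bc_rec: len(s)<=1 leaves; s[:mid]/s[mid:] with 0 ≤ mid ≤ len are exactly List.take/List.drop,
-- and len(s)//2 on the nonnegative length is exactly Nat division
def bc_rec (l : List Char) : Int × Int × Int × Int :=
  if l.length ≤ 1 then
    match l with
    | [] => (0, 0, 0, 0)
    | c :: _ => (1, if PySem.Chars.isalpha c then 1 else 0,
                    if PySem.Chars.isdigit c then 1 else 0,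
                    if PySem.Chars.isspace c then 1 else 0)
  else
    let mid := l.length / 2
    let a := bc_rec (l.take mid)
    let b := bc_rec (l.drop mid)
    (a.1 + b.1, a.2.1 + b.2.1, a.2.2.1 + b.2.2.1, a.2.2.2 + b.2.2.2)
termination_by l.length
decreasing_by
  · simp [List.length_take]; omega
  · simp [List.length_drop]; omega

def basic_count_alt (text : String) : List (String × Int) :=
  let r := bc_rec text.toList
  [("chars", r.1), ("letters", r.2.1), ("digits", r.2.2.1), ("spaces", r.2.2.2)]

-- ===== PRECONDITION & SPEC =====
def Spec_basic_count (text : String) (out : List (String × Int)) : Prop := out = basic_count_alt text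
instance (text : String) (out : List (String × Int)) : Decidable (Spec_basic_count text out) := by unfold Spec_basic_count; infer_instance

-- ===== CLAIM (what is proved, stated in full; the proofs are below) =====
def Claim_equal_basic_count : Prop := ∀ (text : String), Dom_basic_count text → Spec_basic_count text (basic_count text)

-- ===== LEMMAS AND PROOFS =====

-- one loop step of A on the literal four-key dict
theorem basic_count_step_mk (c : Char) (n a g s : Int) :
    basic_count_step (PySem.Dict.mk [("chars", n), ("letters", a), ("digits", g), ("spaces", s)]) c
    = PySem.Dict.mk [("chars", n + 1),
        ("letters", a + if PySem.Chars.isalpha c then 1 else 0),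
        ("digits", g + if PySem.Chars.isdigit c then 1 else 0),
        ("spaces", s + if PySem.Chars.isspace c then 1 else 0)] := by
  cases hA : PySem.Chars.isalpha c <;> cases hD : PySem.Chars.isdigit c <;>
    cases hS : PySem.Chars.isspace c <;>
    simp [basic_count_step, PySem.Dict.modify, PySem.Dict.get?, PySem.Dict.getD,
      PySem.Dict.insert, PySem.Dict.contains, hA, hD, hS]

-- Invariant of A's loop: the fold adds the length / three predicate counts of the list.
theorem basic_count_fold (l : List Char) (n a g s : Int) :
    l.foldl basic_count_step
      (PySem.Dict.mk [("chars", n), ("letters", a), ("digits", g), ("spaces", s)])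
    = PySem.Dict.mk [("chars", n + l.length),
        ("letters", a + l.countP PySem.Chars.isalpha),
        ("digits", g + l.countP PySem.Chars.isdigit),
        ("spaces", s + l.countP PySem.Chars.isspace)] := by
  induction l generalizing n a g s with
  | nil => simp
  | cons c t ih =>
    rw [List.foldl_cons, basic_count_step_mk, ih]
    simp only [List.length_cons, List.countP_cons]
    cases hA : PySem.Chars.isalpha c <;> cases hD : PySem.Chars.isdigit c <;>
      cases hS : PySem.Chars.isspace c <;>
      simp <;> omega

-- B's recursion computes length and the three predicate counts (countP splits over take ++ drop).
theorem bc_rec_eq (l : List Char) :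
    bc_rec l = ((l.length : Int), (l.countP PySem.Chars.isalpha : Int),
                (l.countP PySem.Chars.isdigit : Int), (l.countP PySem.Chars.isspace : Int)) := by
  induction l using bc_rec.induct with
  | case1 h =>
    simp [bc_rec]
  | case2 a t h =>
    have ht : t = [] := by cases t <;> simp_all
    subst ht
    simp [bc_rec, List.countP_cons]
  | case3 l h mid ih1 ih2 =>
    rw [show List.take mid l = List.take (l.length / 2) l from rfl] at ih1
    rw [show List.drop mid l = List.drop (l.length / 2) l from rfl] at ih2
    rw [bc_rec.eq_def]
    simp only [h, if_false]
    rw [ih1, ih2]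
    have key : ∀ p : Char → Bool,
        l.countP p = (l.take (l.length / 2)).countP p + (l.drop (l.length / 2)).countP p := by
      intro p
      conv_lhs => rw [← List.take_append_drop (l.length / 2) l]
      rw [List.countP_append]
    have hlen : (l.take (l.length / 2)).length + (l.drop (l.length / 2)).length = l.length := by
      conv_rhs => rw [← List.take_append_drop (l.length / 2) l]
      rw [List.length_append]
    simp only [Prod.mk.injEq]
    refine ⟨?_, ?_, ?_, ?_⟩
    · omega
    · rw [key]; push_cast; ring
    · rw [key]; push_cast; ring
    · rw [key]; push_cast; ring

-- ===== VERDICT (by name: the statement is the Claim_ definition above) =====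
theorem basic_count_spec : Claim_equal_basic_count := by
  intro text _
  show basic_count text = basic_count_alt text
  show (List.foldl basic_count_step
      (PySem.Dict.ofList [("chars", 0), ("letters", 0), ("digits", 0), ("spaces", 0)])
      text.toList).items = basic_count_alt text
  rw [show PySem.Dict.ofList [("chars", (0:Int)), ("letters", 0), ("digits", 0), ("spaces", 0)]
      = PySem.Dict.mk [("chars", 0), ("letters", 0), ("digits", 0), ("spaces", 0)] from rfl]
  rw [basic_count_fold]
  simp [basic_count_alt, bc_rec_eq]
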